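-- pv_equiv track=rewrite | github.com/pranya13/100DaysOfCode-2025 | DSA/PranyaGupta_500126032/Day57Question2.py | isMaxHeap
-- ===== SOURCE A (Python) =====
-- def isMaxHeap(arr):
--     n = len(arr)
--     for i in range(n//2):
--         l = 2*i+1
--         r = 2*i+2
--         if l<n and arr[i] <  arr[l]:
--             return False
--         if r<n and arr[i] < arr[r]:
--             return False
--     return True
-- ===== SOURCE B (Python) =====
-- def isMaxHeap(arr):
--     n = len(arr)
--
--     def ok(i):
--         l, r = 2 * i + 1, 2 * i + 2
--         if l < n and (arr[l] > arr[i] or not ok(l)):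
--             return False
--         if r < n and (arr[r] > arr[i] or not ok(r)):
--             return False
--         return True
--
--     return ok(0) if n else True
-- ===== Notes on version B (the rewrite author's own statement) =====
-- stated objective: alternative
-- what changed: B verifies the heap property by a top-down recursive depth-first descent over the implicit binary tree from the root (each node checks its children then recurses into them, short-circuiting), instead of A's flat index loop over parent positions 0..n//2-1.
import Mathlib
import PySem

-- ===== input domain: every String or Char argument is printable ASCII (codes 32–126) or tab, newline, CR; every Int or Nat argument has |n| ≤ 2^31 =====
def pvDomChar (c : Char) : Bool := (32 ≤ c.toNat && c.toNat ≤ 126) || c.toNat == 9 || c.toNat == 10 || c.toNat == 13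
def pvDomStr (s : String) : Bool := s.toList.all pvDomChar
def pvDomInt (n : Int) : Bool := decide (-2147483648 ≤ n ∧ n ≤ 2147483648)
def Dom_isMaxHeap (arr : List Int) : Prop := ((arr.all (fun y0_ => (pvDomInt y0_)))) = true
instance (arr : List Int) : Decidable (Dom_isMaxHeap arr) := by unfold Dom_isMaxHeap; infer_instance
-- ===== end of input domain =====

-- B verifies the heap property by recursive depth-first descent over the implicit tree
-- from the root, instead of A's flat loop over parent indices; same verdict, proved equal.


-- ===== PORT A =====
-- loop over parent indices i in range(n//2); indices i, l, r are always in range, so pyGetD is exact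
def isMaxHeapGo (arr : List Int) (n : Int) : List Int → Bool
  | [] => true
  | i :: rest =>
    let l := 2*i+1
    let r := 2*i+2
    if l < n ∧ PySem.List.pyGetD arr i 0 < PySem.List.pyGetD arr l 0 then false
    else if r < n ∧ PySem.List.pyGetD arr i 0 < PySem.List.pyGetD arr r 0 then false
    else isMaxHeapGo arr n rest

def isMaxHeap (arr : List Int) : Bool :=
  let n : Int := arr.length
  isMaxHeapGo arr n (PySem.List.pyRange 0 (PySem.Int.floordiv n 2) 1)

-- ===== PORT B =====
-- recursive descent ok(i): a guarded 'if l < n and (arr[l] > arr[i] or not ok(l)): return False'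
-- block per child, then True; each block is rendered as '(l < n → no violation ∧ ok l)' in Bool
-- form. i stays a natural number (Python's i is always ≥ 0 here), indices are in range so pyGetD
-- is exact.
def okB (arr : List Int) (n : Nat) (i : Nat) : Bool :=
  (if _h : 2*i+1 < n then
     !(PySem.List.pyGetD arr ((i : Int)) 0 < PySem.List.pyGetD arr ((2*i+1 : Nat) : Int) 0)
       && okB arr n (2*i+1)
   else true)
  &&
  (if _h : 2*i+2 < n then
     !(PySem.List.pyGetD arr ((i : Int)) 0 < PySem.List.pyGetD arr ((2*i+2 : Nat) : Int) 0)
       && okB arr n (2*i+2)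
   else true)
termination_by n - i
decreasing_by all_goals omega

def isMaxHeap_alt (arr : List Int) : Bool :=
  let n := arr.length
  if n ≠ 0 then okB arr n 0 else true

-- ===== PRECONDITION & SPEC =====
def Spec_isMaxHeap (arr : List Int) (out : Bool) : Prop := out = isMaxHeap_alt arr
instance (arr : List Int) (out : Bool) : Decidable (Spec_isMaxHeap arr out) := by unfold Spec_isMaxHeap; infer_instance

-- ===== CLAIM =====
def Claim_equal_isMaxHeap : Prop := ∀ (arr : List Int), Dom_isMaxHeap arr → Spec_isMaxHeap arr (isMaxHeap arr)

-- ===== LEMMAS AND PROOFS =====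

-- the per-node heap condition both programs test
def HeapOkAt (arr : List Int) (n i : Nat) : Prop :=
  (2*i+1 < n → ¬ PySem.List.pyGetD arr (i : Int) 0 < PySem.List.pyGetD arr ((2*i+1 : Nat) : Int) 0) ∧
  (2*i+2 < n → ¬ PySem.List.pyGetD arr (i : Int) 0 < PySem.List.pyGetD arr ((2*i+2 : Nat) : Int) 0)

lemma isMaxHeapGo_true_iff (arr : List Int) (n : Int) (is : List Int) :
    isMaxHeapGo arr n is = true ↔
      ∀ i ∈ is, (2*i+1 < n → ¬ PySem.List.pyGetD arr i 0 < PySem.List.pyGetD arr (2*i+1) 0) ∧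
                (2*i+2 < n → ¬ PySem.List.pyGetD arr i 0 < PySem.List.pyGetD arr (2*i+2) 0) := by
  induction is with
  | nil => simp [isMaxHeapGo]
  | cons i rest ih =>
    simp only [isMaxHeapGo, List.mem_cons]
    split_ifs with h1 h2
    · constructor
      · intro h; exact absurd h (by simp)
      · intro h; exact absurd (h i (Or.inl rfl)).1 (by tauto)
    · constructor
      · intro h; exact absurd h (by simp)
      · intro h; exact absurd (h i (Or.inl rfl)).2 (by tauto)
    · rw [ih]
      constructor
      · intro h j hj
        rcases hj with rfl | hj
        · exact ⟨fun hl hlt => h1 ⟨hl, hlt⟩, fun hr hlt => h2 ⟨hr, hlt⟩⟩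
        · exact h j hj
      · intro h j hj; exact h j (Or.inr hj)

lemma okB_unfold (arr : List Int) (n i : Nat) :
    okB arr n i =
      ((if 2*i+1 < n then
         (!(PySem.List.pyGetD arr ((i : Int)) 0 < PySem.List.pyGetD arr ((2*i+1 : Nat) : Int) 0)
           && okB arr n (2*i+1))
       else true)
      &&
      (if 2*i+2 < n then
         (!(PySem.List.pyGetD arr ((i : Int)) 0 < PySem.List.pyGetD arr ((2*i+2 : Nat) : Int) 0)
           && okB arr n (2*i+2))
       else true)) := by
  rw [okB]; simp

-- completeness: if the local condition holds everywhere below n, the descent succeeds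
lemma okB_of_all (arr : List Int) (n : Nat)
    (hall : ∀ j, j < n → HeapOkAt arr n j) :
    ∀ i, okB arr n i = true := by
  intro i
  induction hk : n - i using Nat.strong_induction_on generalizing i with
  | _ k ih =>
    subst hk
    rw [okB_unfold]
    simp only [Bool.and_eq_true]
    constructor
    · split_ifs with h1
      · have hi : i < n := by omega
        simp only [Bool.and_eq_true, Bool.not_eq_eq_eq_not, Bool.not_true, decide_eq_false_iff_not]
        exact ⟨(hall i hi).1 h1, ih (n - (2*i+1)) (by omega) (2*i+1) rfl⟩
      · rfl
    · split_ifs with h2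
      · have hi : i < n := by omega
        simp only [Bool.and_eq_true, Bool.not_eq_eq_eq_not, Bool.not_true, decide_eq_false_iff_not]
        exact ⟨(hall i hi).2 h2, ih (n - (2*i+2)) (by omega) (2*i+2) rfl⟩
      · rfl

-- soundness: a successful call validates the node itself and propagates to its children
lemma okB_local (arr : List Int) (n i : Nat) (h : okB arr n i = true) :
    HeapOkAt arr n i ∧
    (2*i+1 < n → okB arr n (2*i+1) = true) ∧
    (2*i+2 < n → okB arr n (2*i+2) = true) := by
  rw [okB_unfold] at h
  simp only [Bool.and_eq_true] at h
  obtain ⟨h1, h2⟩ := h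
  constructor
  · constructor
    · intro hl; rw [if_pos hl] at h1
      simp only [Bool.and_eq_true, Bool.not_eq_eq_eq_not, Bool.not_true, decide_eq_false_iff_not] at h1
      exact h1.1
    · intro hr; rw [if_pos hr] at h2
      simp only [Bool.and_eq_true, Bool.not_eq_eq_eq_not, Bool.not_true, decide_eq_false_iff_not] at h2
      exact h2.1
  constructor
  · intro hl; rw [if_pos hl] at h1
    simp only [Bool.and_eq_true] at h1; exact h1.2
  · intro hr; rw [if_pos hr] at h2
    simp only [Bool.and_eq_true] at h2; exact h2.2

-- soundness from the root: ok(0) reaches every index j < n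
lemma okB_all (arr : List Int) (n : Nat) (h0 : okB arr n 0 = true) :
    ∀ j, j < n → HeapOkAt arr n j := by
  have hok : ∀ j, j < n → okB arr n j = true := by
    intro j
    induction j using Nat.strong_induction_on with
    | _ j ih =>
      intro hj
      rcases Nat.eq_zero_or_pos j with rfl | hpos
      · exact h0
      · have hp : (j - 1) / 2 < j := by omega
        have hjp : j = 2*((j-1)/2)+1 ∨ j = 2*((j-1)/2)+2 := by omega
        have hpok := ih ((j-1)/2) hp (by omega)
        have := okB_local arr n ((j-1)/2) hpok
        rcases hjp with hc | hc
        · rw [hc]; exact this.2.1 (by omega)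
        · rw [hc]; exact this.2.2 (by omega)
  intro j hj
  exact (okB_local arr n j (hok j hj)).1

-- ===== VERDICT =====
theorem isMaxHeap_spec : Claim_equal_isMaxHeap := by
  intro arr _
  show isMaxHeap arr = isMaxHeap_alt arr
  rw [isMaxHeap, isMaxHeap_alt]
  set n := arr.length with hn
  rcases Nat.eq_zero_or_pos n with hz | hpos
  · simp [hz, isMaxHeapGo, PySem.List.pyRange, PySem.Int.floordiv]
  · rw [if_pos (by omega)]
    rw [Bool.eq_iff_iff, isMaxHeapGo_true_iff]
    have h2 : PySem.Int.floordiv (n : Int) 2 = (n : Int) / 2 :=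
      PySem.Int.floordiv_eq_ediv_of_pos (by omega)
    rw [h2]
    constructor
    · intro h
      apply okB_of_all
      intro j hj
      by_cases hl : 2*j+1 < n
      · have hmem : (j : Int) ∈ PySem.List.pyRange 0 ((n : Int) / 2) 1 := by
          rw [PySem.List.mem_pyRange_one]; omega
        have := h (j : Int) hmem
        constructor
        · intro _
          have := this.1 (by push_cast; omega)
          convert this using 3 <;> push_cast <;> ring
        · intro hr
          have := this.2 (by push_cast; omega)
          convert this using 3 <;> push_cast <;> ring
      · exact ⟨fun hc => absurd hc hl, fun hc => absurd hc (by omega)⟩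
    · intro h i hmem
      rw [PySem.List.mem_pyRange_one] at hmem
      have hi0 : 0 ≤ i := hmem.1
      obtain ⟨j, rfl⟩ := Int.eq_ofNat_of_zero_le hi0
      have hj : j < n := by omega
      have := okB_all arr n h j hj
      constructor
      · intro hl
        have := this.1 (by omega)
        convert this using 3 <;> push_cast <;> ring
      · intro hr
        have := this.2 (by omega)
        convert this using 3 <;> push_cast <;> ring
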